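-- pv_equiv track=rewrite | github.com/branden254/data_analytics | Comparison Analysis 5.py | normalize_product_name
-- ===== SOURCE A (Python) =====
-- def normalize_product_name(name):
--     name = name.lower()
--     replacements = {
--         '2yr': '2 years',
--         '1yr': '1 year',
--         '3yr': '3 years',
--         # Add more replacements as needed
--     }
--     for key, value in replacements.items():
--         name = name.replace(key, value)
--     return name
-- ===== SOURCE B (Python) =====
-- def normalize_product_name(name):
--     table = {'2yr': '2 years', '1yr': '1 year', '3yr': '3 years'}
--     s = name.lower()
--     out = []
--     i = 0
--     n = len(s)
--     while i < n:
--         rep = table.get(s[i:i+3])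
--         if rep is not None:
--             out.append(rep)
--             i += 3
--         else:
--             out.append(s[i])
--             i += 1
--     return ''.join(out)
-- ===== Notes on version B (the rewrite author's own statement) =====
-- stated objective: alternative
-- what changed: A lowercases and then runs three sequential full-string .replace passes (one per dict entry); B lowercases once and does a single left-to-right scan that looks each 3-character window up in the replacement table, emitting the mapped value (skipping 3) or copying one character.
import Mathlib
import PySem

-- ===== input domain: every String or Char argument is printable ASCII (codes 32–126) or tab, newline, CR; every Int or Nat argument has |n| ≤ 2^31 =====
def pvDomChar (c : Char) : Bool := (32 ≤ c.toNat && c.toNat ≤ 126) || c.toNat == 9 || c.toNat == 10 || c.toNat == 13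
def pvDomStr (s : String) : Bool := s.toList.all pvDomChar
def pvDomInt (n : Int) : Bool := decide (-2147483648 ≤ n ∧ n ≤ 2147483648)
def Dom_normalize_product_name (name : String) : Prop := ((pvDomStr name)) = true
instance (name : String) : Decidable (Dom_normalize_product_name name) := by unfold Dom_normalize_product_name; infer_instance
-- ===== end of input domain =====

-- B replaces A's three sequential full-string .replace passes by ONE left-to-right scan with a
-- table lookup on the next three characters (alternative decomposition; same result, not claimed faster).

-- ===== PORT A =====
-- A: lowercase, then for each (key, value) of the dict in insertion order, name = name.replace(key, value)
def normalize_product_name (name : String) : String :=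
  let replacements : PySem.Dict String String :=
    ((PySem.Dict.empty.insert "2yr" "2 years").insert "1yr" "1 year").insert "3yr" "3 years"
  replacements.items.foldl (fun n kv => PySem.Str.replace n kv.1 kv.2) (PySem.Str.lower name)

-- ===== PORT B =====
-- B's lookup table, with str ported as List Char
def pvTable : PySem.Dict (List Char) (List Char) :=
  ((PySem.Dict.empty.insert ['2','y','r'] ['2',' ','y','e','a','r','s']).insert
      ['1','y','r'] ['1',' ','y','e','a','r']).insert
    ['3','y','r'] ['3',' ','y','e','a','r','s']

-- B's while loop: at index i look up s[i:i+3]; on a hit emit the value and skip 3 chars, else copy one char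
def pvScan : List Char → List Char
  | [] => []
  | c :: t =>
    match PySem.Dict.get? pvTable (List.take 3 (c :: t)) with
    | some v => v ++ pvScan (List.drop 2 t)
    | none => c :: pvScan t
termination_by l => l.length
decreasing_by
  · simp only [List.length_cons]; have := List.length_drop (l := t) (i := 2); omega
  · simp

def normalize_product_name_alt (name : String) : String :=
  String.mk (pvScan (PySem.Str.lower name).toList)

-- ===== PRECONDITION & SPEC =====
def Spec_normalize_product_name (name : String) (out : String) : Prop := out = normalize_product_name_alt name
instance (name : String) (out : String) : Decidable (Spec_normalize_product_name name out) := by unfold Spec_normalize_product_name; infer_instance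

-- ===== CLAIM (what is proved, stated in full; the proofs are below) =====
def Claim_equal_normalize_product_name : Prop := ∀ (name : String), Dom_normalize_product_name name → Spec_normalize_product_name name (normalize_product_name name)

-- ===== LEMMAS AND PROOFS =====

-- structural recursion equivalent of PySem.Chars.replace for a nonempty pattern
def pvRep (old new : List Char) : List Char → List Char
  | [] => []
  | c :: t =>
    if old.isPrefixOf (c :: t) then new ++ pvRep old new (List.drop (old.length - 1) t)
    else c :: pvRep old new t
termination_by l => l.length
decreasing_by
  · simp only [List.length_cons]; have := List.length_drop (l := t) (i := old.length - 1); omega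
  · simp

lemma pvGo_eq (old new : List Char) (hold : old ≠ []) :
    ∀ fuel l acc, l.length ≤ fuel →
      PySem.Chars.replace.go old new fuel l acc = acc.reverse ++ pvRep old new l := by
  intro fuel
  induction fuel with
  | zero =>
      intro l acc hl
      have : l = [] := List.eq_nil_of_length_eq_zero (by omega)
      subst this
      simp [PySem.Chars.replace.go, pvRep]
  | succ n ih =>
      intro l acc hl
      cases l with
      | nil => simp [PySem.Chars.replace.go, pvRep]
      | cons c t =>
          rw [PySem.Chars.replace.go]
          by_cases hp : old.isPrefixOf (c :: t) = true
          · obtain ⟨m, hm⟩ : ∃ m, old.length = m + 1 := by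
              cases old with
              | nil => exact absurd rfl hold
              | cons _ _ => exact ⟨_, rfl⟩
            have hm' : old.length - 1 = m := by omega
            have hdrop : List.drop old.length (c :: t) = List.drop (old.length - 1) t := by
              rw [hm, List.drop_succ_cons]; simp
            rw [if_pos hp, hdrop, ih _ _ (by have := List.length_drop (l := t) (i := old.length - 1); simp at hl ⊢; omega)]
            rw [pvRep, if_pos hp]
            simp
          · rw [if_neg hp, ih _ _ (by simp at hl; omega)]
            rw [pvRep, if_neg hp]
            simp

lemma pvReplace_eq (old new : List Char) (hold : old ≠ []) (s : List Char) :
    PySem.Chars.replace s old new = pvRep old new s := by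
  rw [PySem.Chars.replace]
  rw [if_neg (by simpa [List.isEmpty_iff] using hold)]
  simpa using pvGo_eq old new hold s.length s [] le_rfl

-- pvScan unfolding equations
lemma pvScan_nil : pvScan [] = [] := by rw [pvScan]

lemma pvScan_cons (c : Char) (t : List Char) :
    pvScan (c :: t) =
      match PySem.Dict.get? pvTable (List.take 3 (c :: t)) with
      | some v => v ++ pvScan (List.drop 2 t)
      | none => c :: pvScan t := by
  rw [pvScan]

-- table misses
lemma pvTable_items :
    pvTable.items = [(['2','y','r'], ['2',' ','y','e','a','r','s']),
                     (['1','y','r'], ['1',' ','y','e','a','r']),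
                     (['3','y','r'], ['3',' ','y','e','a','r','s'])] := by decide

lemma pvGet_none1 (c : Char) : PySem.Dict.get? pvTable [c] = none := by
  simp [PySem.Dict.get?, pvTable_items, List.find?]

lemma pvGet_none2 (c d : Char) : PySem.Dict.get? pvTable [c, d] = none := by
  simp [PySem.Dict.get?, pvTable_items, List.find?]

lemma pvGet_none3 (c1 c2 c3 : Char)
    (h2 : ¬('2' = c1 ∧ 'y' = c2 ∧ 'r' = c3))
    (h1 : ¬('1' = c1 ∧ 'y' = c2 ∧ 'r' = c3))
    (h3 : ¬('3' = c1 ∧ 'y' = c2 ∧ 'r' = c3)) :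
    PySem.Dict.get? pvTable [c1, c2, c3] = none := by
  have e2 : ('2' == c1 && ('y' == c2 && 'r' == c3)) = false := by
    by_contra h; simp at h; exact h2 ⟨h.1, h.2.1, h.2.2⟩
  have e1 : ('1' == c1 && ('y' == c2 && 'r' == c3)) = false := by
    by_contra h; simp at h; exact h1 ⟨h.1, h.2.1, h.2.2⟩
  have e3 : ('3' == c1 && ('y' == c2 && 'r' == c3)) = false := by
    by_contra h; simp at h; exact h3 ⟨h.1, h.2.1, h.2.2⟩
  simp [PySem.Dict.get?, pvTable_items, List.find?, e1, e2, e3]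

-- a cons whose head cannot start the pattern passes through pvRep
lemma pvRep_cons_ne (o : Char) (os new : List Char) (c : Char) (t : List Char) (h : o ≠ c) :
    pvRep (o :: os) new (c :: t) = c :: pvRep (o :: os) new t := by
  rw [pvRep, if_neg (by simp [List.isPrefixOf_cons₂, h])]

-- if pvRep's output starts with "yr" and the value starts with neither 'y' nor 'r', the input did
lemma pvRep_yr_shape (old : List Char) (n0 : Char) (ns : List Char)
    (hy : n0 ≠ 'y') (hr : n0 ≠ 'r') :
    ∀ u v, pvRep old (n0 :: ns) u = 'y' :: 'r' :: v → ∃ w, u = 'y' :: 'r' :: w := by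
  intro u v h
  cases u with
  | nil => rw [pvRep] at h; exact absurd h (by simp)
  | cons c t =>
      rw [pvRep] at h
      by_cases hp : old.isPrefixOf (c :: t) = true
      · rw [if_pos hp] at h
        cases h' : n0 :: ns ++ pvRep old (n0 :: ns) (List.drop (old.length - 1) t) with
        | nil => rw [h'] at h; exact absurd h (by simp)
        | cons z zs =>
            rw [h'] at h
            have hz : z = n0 := by simpa using (List.cons_eq_cons.mp h'.symm).1
            have : z = 'y' := (List.cons_eq_cons.mp h).1
            exact absurd (hz ▸ this) hy
      · rw [if_neg hp] at h
        obtain ⟨hc, h1⟩ := List.cons_eq_cons.mp h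
        subst hc
        cases t with
        | nil => rw [pvRep] at h1; exact absurd h1 (by simp)
        | cons d t2 =>
            rw [pvRep] at h1
            by_cases hq : old.isPrefixOf (d :: t2) = true
            · rw [if_pos hq] at h1
              cases h' : n0 :: ns ++ pvRep old (n0 :: ns) (List.drop (old.length - 1) t2) with
              | nil => rw [h'] at h1; exact absurd h1 (by simp)
              | cons z zs =>
                  rw [h'] at h1
                  have hz : z = n0 := by simpa using (List.cons_eq_cons.mp h'.symm).1
                  have : z = 'r' := (List.cons_eq_cons.mp h1).1
                  exact absurd (hz ▸ this) hr
            · rw [if_neg hq] at h1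
              obtain ⟨hd, _⟩ := List.cons_eq_cons.mp h1
              subst hd
              exact ⟨t2, rfl⟩

-- push pvRep through a block of characters none of which starts the pattern
lemma pvRep_append_push (o : Char) (os new : List Char) :
    ∀ (pre : List Char), (∀ c ∈ pre, o ≠ c) →
      ∀ x, pvRep (o :: os) new (pre ++ x) = pre ++ pvRep (o :: os) new x := by
  intro pre
  induction pre with
  | nil => intro _ x; simp
  | cons p ps ih =>
      intro h x
      rw [List.cons_append, pvRep_cons_ne _ _ _ _ _ (h p (by simp)),
          ih (fun c hc => h c (by simp [hc])) x]
      simp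

set_option maxRecDepth 4096 in
lemma pvMainAux : ∀ (n : Nat) (l : List Char), l.length ≤ n →
    pvRep ['3','y','r'] ['3',' ','y','e','a','r','s']
      (pvRep ['1','y','r'] ['1',' ','y','e','a','r']
        (pvRep ['2','y','r'] ['2',' ','y','e','a','r','s'] l)) = pvScan l := by
  intro n
  induction n with
  | zero =>
      intro l hl
      have : l = [] := List.eq_nil_of_length_eq_zero (by omega)
      subst this
      simp [pvRep, pvScan_nil]
  | succ n ih =>
      intro l hl
      match l with
      | [] => simp [pvRep, pvScan_nil]
      | [c1] =>
          rw [pvScan_cons]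
          simp only [List.take, pvGet_none1]
          simp [pvRep, pvScan_nil, List.isPrefixOf]
      | [c1, c2] =>
          rw [pvScan_cons]
          simp only [List.take, pvGet_none2]
          rw [pvScan_cons]
          simp only [List.take, pvGet_none1]
          simp [pvRep, pvScan_nil, List.isPrefixOf]
      | c1 :: c2 :: c3 :: t =>
          have hlen : t.length ≤ n := by simp at hl; omega
          have hlen2 : (c2 :: c3 :: t).length ≤ n := by simp at hl ⊢; omega
          by_cases H2 : '2' = c1 ∧ 'y' = c2 ∧ 'r' = c3
          · obtain ⟨rfl, rfl, rfl⟩ := H2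
            rw [pvScan_cons]
            have hg : pvTable.get? (List.take 3 ('2'::'y'::'r'::t)) =
                some ['2',' ','y','e','a','r','s'] := by
              have ht : List.take 3 ('2'::'y'::'r'::t) = ['2','y','r'] := by simp
              rw [ht]; decide
            rw [hg]
            have u2 : pvRep ['2','y','r'] ['2',' ','y','e','a','r','s'] ('2'::'y'::'r'::t) =
                ['2',' ','y','e','a','r','s'] ++ pvRep ['2','y','r'] ['2',' ','y','e','a','r','s'] t := by
              rw [pvRep, if_pos (by simp [List.isPrefixOf])]; simp
            rw [u2,
              pvRep_append_push '1' ['y','r'] ['1',' ','y','e','a','r']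
                ['2',' ','y','e','a','r','s'] (by simp),
              pvRep_append_push '3' ['y','r'] ['3',' ','y','e','a','r','s']
                ['2',' ','y','e','a','r','s'] (by simp),
              ih t hlen]
            simp
          · by_cases H1 : '1' = c1 ∧ 'y' = c2 ∧ 'r' = c3
            · obtain ⟨rfl, rfl, rfl⟩ := H1
              rw [pvScan_cons]
              have hg : pvTable.get? (List.take 3 ('1'::'y'::'r'::t)) =
                  some ['1',' ','y','e','a','r'] := by
                have ht : List.take 3 ('1'::'y'::'r'::t) = ['1','y','r'] := by simp
                rw [ht]; decide
              rw [hg]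
              have u2 : pvRep ['2','y','r'] ['2',' ','y','e','a','r','s'] ('1'::'y'::'r'::t) =
                  '1'::'y'::'r':: pvRep ['2','y','r'] ['2',' ','y','e','a','r','s'] t := by
                rw [pvRep_cons_ne '2' ['y','r'] ['2',' ','y','e','a','r','s'] '1' ('y'::'r'::t) (by decide),
                    pvRep_cons_ne '2' ['y','r'] ['2',' ','y','e','a','r','s'] 'y' ('r'::t) (by decide),
                    pvRep_cons_ne '2' ['y','r'] ['2',' ','y','e','a','r','s'] 'r' t (by decide)]
              have u1 : pvRep ['1','y','r'] ['1',' ','y','e','a','r']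
                    ('1'::'y'::'r':: pvRep ['2','y','r'] ['2',' ','y','e','a','r','s'] t) =
                  ['1',' ','y','e','a','r'] ++ pvRep ['1','y','r'] ['1',' ','y','e','a','r']
                    (pvRep ['2','y','r'] ['2',' ','y','e','a','r','s'] t) := by
                rw [pvRep, if_pos (by simp [List.isPrefixOf])]; simp
              rw [u2, u1,
                pvRep_append_push '3' ['y','r'] ['3',' ','y','e','a','r','s']
                  ['1',' ','y','e','a','r'] (by simp),
                ih t hlen]
              simp
            · by_cases H3 : '3' = c1 ∧ 'y' = c2 ∧ 'r' = c3
              · obtain ⟨rfl, rfl, rfl⟩ := H3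
                rw [pvScan_cons]
                have hg : pvTable.get? (List.take 3 ('3'::'y'::'r'::t)) =
                    some ['3',' ','y','e','a','r','s'] := by
                  have ht : List.take 3 ('3'::'y'::'r'::t) = ['3','y','r'] := by simp
                  rw [ht]; decide
                rw [hg]
                have u2 : pvRep ['2','y','r'] ['2',' ','y','e','a','r','s'] ('3'::'y'::'r'::t) =
                    '3'::'y'::'r':: pvRep ['2','y','r'] ['2',' ','y','e','a','r','s'] t := by
                  rw [pvRep_cons_ne '2' ['y','r'] ['2',' ','y','e','a','r','s'] '3' ('y'::'r'::t) (by decide),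
                      pvRep_cons_ne '2' ['y','r'] ['2',' ','y','e','a','r','s'] 'y' ('r'::t) (by decide),
                      pvRep_cons_ne '2' ['y','r'] ['2',' ','y','e','a','r','s'] 'r' t (by decide)]
                have u1 : pvRep ['1','y','r'] ['1',' ','y','e','a','r']
                      ('3'::'y'::'r':: pvRep ['2','y','r'] ['2',' ','y','e','a','r','s'] t) =
                    '3'::'y'::'r':: pvRep ['1','y','r'] ['1',' ','y','e','a','r']
                      (pvRep ['2','y','r'] ['2',' ','y','e','a','r','s'] t) := by
                  rw [pvRep_cons_ne '1' ['y','r'] ['1',' ','y','e','a','r'] '3' _ (by decide),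
                      pvRep_cons_ne '1' ['y','r'] ['1',' ','y','e','a','r'] 'y' _ (by decide),
                      pvRep_cons_ne '1' ['y','r'] ['1',' ','y','e','a','r'] 'r' _ (by decide)]
                have u3 : pvRep ['3','y','r'] ['3',' ','y','e','a','r','s']
                      ('3'::'y'::'r':: pvRep ['1','y','r'] ['1',' ','y','e','a','r']
                        (pvRep ['2','y','r'] ['2',' ','y','e','a','r','s'] t)) =
                    ['3',' ','y','e','a','r','s'] ++ pvRep ['3','y','r'] ['3',' ','y','e','a','r','s']
                      (pvRep ['1','y','r'] ['1',' ','y','e','a','r']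
                        (pvRep ['2','y','r'] ['2',' ','y','e','a','r','s'] t)) := by
                  rw [pvRep, if_pos (by simp [List.isPrefixOf])]; simp
                rw [u2, u1, u3, ih t hlen]
                simp
              · -- no key matches at this position: every pass copies c1
                have u2 : pvRep ['2','y','r'] ['2',' ','y','e','a','r','s'] (c1::c2::c3::t) =
                    c1 :: pvRep ['2','y','r'] ['2',' ','y','e','a','r','s'] (c2::c3::t) := by
                  rw [pvRep, if_neg (by simp [List.isPrefixOf]; intro a b c; exact H2 ⟨a, b, c⟩)]
                have hp1 : ¬ (['1','y','r'].isPrefixOf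
                    (c1 :: pvRep ['2','y','r'] ['2',' ','y','e','a','r','s'] (c2::c3::t))) = true := by
                  intro hp
                  simp [List.isPrefixOf] at hp
                  obtain ⟨hc1, hpre⟩ := hp
                  obtain ⟨v, hv⟩ := hpre
                  obtain ⟨w, hw⟩ := pvRep_yr_shape ['2','y','r'] '2' [' ','y','e','a','r','s']
                    (by decide) (by decide) (c2::c3::t) v hv.symm
                  obtain ⟨hc2, hw2⟩ := List.cons_eq_cons.mp hw
                  obtain ⟨hc3, _⟩ := List.cons_eq_cons.mp hw2
                  exact H1 ⟨hc1, hc2.symm, hc3.symm⟩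
                have u1 : pvRep ['1','y','r'] ['1',' ','y','e','a','r']
                      (c1 :: pvRep ['2','y','r'] ['2',' ','y','e','a','r','s'] (c2::c3::t)) =
                    c1 :: pvRep ['1','y','r'] ['1',' ','y','e','a','r']
                      (pvRep ['2','y','r'] ['2',' ','y','e','a','r','s'] (c2::c3::t)) := by
                  rw [pvRep, if_neg hp1]
                have hp3 : ¬ (['3','y','r'].isPrefixOf
                    (c1 :: pvRep ['1','y','r'] ['1',' ','y','e','a','r']
                      (pvRep ['2','y','r'] ['2',' ','y','e','a','r','s'] (c2::c3::t)))) = true := by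
                  intro hp
                  simp [List.isPrefixOf] at hp
                  obtain ⟨hc1, hpre⟩ := hp
                  obtain ⟨v, hv⟩ := hpre
                  obtain ⟨w, hw⟩ := pvRep_yr_shape ['1','y','r'] '1' [' ','y','e','a','r']
                    (by decide) (by decide) _ v hv.symm
                  obtain ⟨w2, hw2⟩ := pvRep_yr_shape ['2','y','r'] '2' [' ','y','e','a','r','s']
                    (by decide) (by decide) (c2::c3::t) w hw
                  obtain ⟨hc2, hw3⟩ := List.cons_eq_cons.mp hw2
                  obtain ⟨hc3, _⟩ := List.cons_eq_cons.mp hw3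
                  exact H3 ⟨hc1, hc2.symm, hc3.symm⟩
                have u3 : pvRep ['3','y','r'] ['3',' ','y','e','a','r','s']
                      (c1 :: pvRep ['1','y','r'] ['1',' ','y','e','a','r']
                        (pvRep ['2','y','r'] ['2',' ','y','e','a','r','s'] (c2::c3::t))) =
                    c1 :: pvRep ['3','y','r'] ['3',' ','y','e','a','r','s']
                      (pvRep ['1','y','r'] ['1',' ','y','e','a','r']
                        (pvRep ['2','y','r'] ['2',' ','y','e','a','r','s'] (c2::c3::t))) := by
                  rw [pvRep, if_neg hp3]
                rw [u2, u1, u3, pvScan_cons]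
                have ht : List.take 3 (c1::c2::c3::t) = [c1, c2, c3] := by simp
                rw [ht, pvGet_none3 c1 c2 c3 H2 H1 H3]
                exact congrArg (c1 :: ·) (ih (c2::c3::t) hlen2)

lemma pvMain (l : List Char) :
    pvRep ['3','y','r'] ['3',' ','y','e','a','r','s']
      (pvRep ['1','y','r'] ['1',' ','y','e','a','r']
        (pvRep ['2','y','r'] ['2',' ','y','e','a','r','s'] l)) = pvScan l :=
  pvMainAux l.length l le_rfl

-- ===== VERDICT (by name: the statement is the Claim_ definition above) =====
theorem normalize_product_name_spec : Claim_equal_normalize_product_name := by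
  intro name _
  unfold Spec_normalize_product_name
  have hA : normalize_product_name name =
      PySem.Str.replace (PySem.Str.replace (PySem.Str.replace
        (PySem.Str.lower name) "2yr" "2 years") "1yr" "1 year") "3yr" "3 years" := rfl
  rw [hA]
  refine String.toList_inj.mp ?_
  unfold normalize_product_name_alt
  simp only [PySem.Str.toList_replace, PySem.Str.toList_lower]
  rw [show ∀ cs : List Char, (String.mk cs).toList = cs from fun _ => Eq.symm (String.ofList_eq.mp rfl)]
  rw [show ("2yr" : String).toList = ['2','y','r'] from rfl,
      show ("2 years" : String).toList = ['2',' ','y','e','a','r','s'] from rfl,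
      show ("1yr" : String).toList = ['1','y','r'] from rfl,
      show ("1 year" : String).toList = ['1',' ','y','e','a','r'] from rfl,
      show ("3yr" : String).toList = ['3','y','r'] from rfl,
      show ("3 years" : String).toList = ['3',' ','y','e','a','r','s'] from rfl,
      pvReplace_eq _ _ (by simp), pvReplace_eq _ _ (by simp), pvReplace_eq _ _ (by simp)]
  exact pvMain (PySem.Chars.lower name.toList)
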